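-- pv_equiv track=rewrite | github.com/daniel880423/Member_System | file/hw2/1090434/s1090434_0.py | homework_2
-- ===== SOURCE A (Python) =====
-- def homework_2(lst): # 請同學記得把檔案名稱改成自己的學號(ex.1104813.py)
--     import copy
--     total = 0
--     lst1 = copy.deepcopy(lst)
--     for i in range(len(lst1)):
--         if lst1[i] % 2 != 0:
--             lst1[i] += 1
--     for i in range(len(lst1)-1):
--         if lst1[i+1] <= lst1[i]:
--             lst1[i+1] = lst1[i] + 2
--     for i in range(len(lst)):
--         total += lst1[i] - lst[i]
--     return total
-- ===== SOURCE B (Python) =====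
-- def homework_2(lst):
--     # adj_i = max_{j<=i} (ev_j + 2*(i-j)) where ev_j = x_j rounded up to even:
--     # keep a running maximum of ev_j - 2*j; adj_i = best + 2*i.
--     total = 0
--     best = None
--     for i, x in enumerate(lst):
--         key = x + x % 2 - 2 * i
--         if best is None or key > best:
--             best = key
--         total += best + 2 * i - x
--     return total
-- ===== Notes on version B (the rewrite author's own statement) =====
-- stated objective: alternative
-- what changed: B replaces A's chained in-place fix-up (three passes over a deep copy, each adjusted value defined from the previous adjusted value) by the closed form adj_i = max over j<=i of (even_j + 2*(i-j)), computed as a running prefix maximum of even_j - 2*j; correctness uses that all bumped values are even, so the strict-increase chain coincides with this max.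
import Mathlib
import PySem

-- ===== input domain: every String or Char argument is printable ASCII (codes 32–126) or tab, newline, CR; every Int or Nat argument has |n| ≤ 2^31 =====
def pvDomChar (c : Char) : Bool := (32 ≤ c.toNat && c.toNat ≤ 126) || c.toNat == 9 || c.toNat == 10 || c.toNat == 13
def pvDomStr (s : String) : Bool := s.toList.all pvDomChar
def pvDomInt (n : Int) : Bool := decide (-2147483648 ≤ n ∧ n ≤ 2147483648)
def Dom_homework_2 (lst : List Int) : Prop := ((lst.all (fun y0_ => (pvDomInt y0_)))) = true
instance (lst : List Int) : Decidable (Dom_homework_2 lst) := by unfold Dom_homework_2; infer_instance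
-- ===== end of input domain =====

-- B replaces A's chained in-place fix-up by the closed form adj_i = max_{j<=i}(even_j + 2(i-j)),
-- computed via a running prefix maximum of even_j - 2j; equivalence proved on all inputs.


-- ===== PORT A =====
-- literal port: three index loops over range(...), in-place updates via pySetD
def homework_2 (lst : List Int) : Int :=
  let lst1 := (PySem.List.pyRange 0 (lst.length : Int) 1).foldl
    (fun l i =>
      if PySem.Int.mod (PySem.List.pyGetD l i 0) 2 ≠ 0 then
        PySem.List.pySetD l i (PySem.List.pyGetD l i 0 + 1)
      else l) lst
  let lst1 := (PySem.List.pyRange 0 ((lst1.length : Int) - 1) 1).foldl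
    (fun l i =>
      if PySem.List.pyGetD l (i+1) 0 ≤ PySem.List.pyGetD l i 0 then
        PySem.List.pySetD l (i+1) (PySem.List.pyGetD l i 0 + 2)
      else l) lst1
  (PySem.List.pyRange 0 (lst.length : Int) 1).foldl
    (fun total i => total + (PySem.List.pyGetD lst1 i 0 - PySem.List.pyGetD lst i 0)) 0

-- ===== PORT B =====
-- literal port of Source B: one fold over enumerate(lst), state = (best : Option Int, total);
-- best is the running maximum of (x + x % 2) - 2*i
def homework_2_alt (lst : List Int) : Int :=
  ((PySem.List.enumerate lst).foldl (fun (st : Option Int × Int) ix =>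
    let key := ix.2 + PySem.Int.mod ix.2 2 - 2 * ix.1
    let best := match st.1 with
      | none => key
      | some b => if key > b then key else b
    (some best, st.2 + (best + 2 * ix.1 - ix.2))) ((none : Option Int), (0 : Int))).2

-- ===== PRECONDITION & SPEC =====
def Spec_homework_2 (lst : List Int) (out : Int) : Prop := out = homework_2_alt lst
instance (lst : List Int) (out : Int) : Decidable (Spec_homework_2 lst out) := by unfold Spec_homework_2; infer_instance

-- ===== CLAIM (what is proved, stated in full; the proofs are below) =====
def Claim_equal_homework_2 : Prop := ∀ (lst : List Int), Dom_homework_2 lst → Spec_homework_2 lst (homework_2 lst)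

-- ===== LEMMAS AND PROOFS =====

/-- evenness bump of one element -/
def pvEv (x : Int) : Int := if PySem.Int.mod x 2 ≠ 0 then x + 1 else x

/-- the "make increasing" chain of A's second loop -/
def pvChain (p : Int) : List Int → List Int
  | [] => []
  | x :: xs => (if x ≤ p then p + 2 else x) :: pvChain (if x ≤ p then p + 2 else x) xs

lemma pvChain_length (p : Int) (l : List Int) : (pvChain p l).length = l.length := by
  induction l generalizing p with
  | nil => rfl
  | cons x xs ih => simp [pvChain, ih]

lemma pvEv_mod (x : Int) : x + PySem.Int.mod x 2 = pvEv x := by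
  unfold pvEv
  have h : PySem.Int.mod x 2 = x % 2 := by
    simp [PySem.Int.mod, Int.fmod_eq_emod]
  rw [h]
  have := Int.emod_two_eq_zero_or_one x
  split_ifs with hne <;> omega

lemma pvEv_even (x : Int) : pvEv x % 2 = 0 := by
  unfold pvEv
  have h : PySem.Int.mod x 2 = x % 2 := by
    simp [PySem.Int.mod, Int.fmod_eq_emod]
  rw [h]
  have := Int.emod_two_eq_zero_or_one x
  split_ifs with hne <;> omega

lemma getD_mid (done : List Int) (x : Int) (xs : List Int) :
    (done ++ x :: xs).getD done.length 0 = x := by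
  simp [List.getD_eq_getElem?_getD]

lemma set_mid (done : List Int) (x : Int) (xs : List Int) (v : Int) :
    (done ++ x :: xs).set done.length v = done ++ v :: xs := by
  simp

-- A's first loop (evenness bump) computes map pvEv on the unprocessed suffix
lemma loop1_aux (rest : List Int) : ∀ (done : List Int),
    (PySem.List.pyRange (done.length : Int) ((done.length + rest.length : Nat) : Int) 1).foldl
      (fun l i =>
        if PySem.Int.mod (PySem.List.pyGetD l i 0) 2 ≠ 0 then
          PySem.List.pySetD l i (PySem.List.pyGetD l i 0 + 1)
        else l) (done ++ rest)
      = done ++ rest.map pvEv := by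
  induction rest with
  | nil => intro done; simp [PySem.List.pyRange_one_eq_nil]
  | cons x xs ih =>
    intro done
    rw [PySem.List.pyRange_one_cons (by push_cast [List.length_cons]; omega)]
    simp only [List.foldl_cons]
    rw [show (if PySem.Int.mod (PySem.List.pyGetD (done ++ x :: xs) (done.length : Int) 0) 2 ≠ 0 then
          PySem.List.pySetD (done ++ x :: xs) (done.length : Int)
            (PySem.List.pyGetD (done ++ x :: xs) (done.length : Int) 0 + 1)
        else (done ++ x :: xs)) = (done ++ [pvEv x]) ++ xs from by
      simp only [PySem.List.pyGetD_natCast, PySem.List.pySetD_natCast, getD_mid, set_mid]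
      unfold pvEv; split_ifs <;> simp]
    rw [show ((done.length : Int) + 1) = (((done ++ [pvEv x]).length : Nat) : Int) from by
          push_cast [List.length_append, List.length_cons, List.length_nil]; ring,
        show ((done.length + (x :: xs).length : Nat) : Int)
            = (((done ++ [pvEv x]).length + xs.length : Nat) : Int) from by
          push_cast [List.length_append, List.length_cons, List.length_nil]; ring,
        ih (done ++ [pvEv x])]
    simp

-- A's second loop (increasing fix) computes pvChain on the unprocessed suffix
lemma loop2_aux (rest : List Int) : ∀ (done : List Int) (p : Int),
    (PySem.List.pyRange (done.length : Int) ((done.length + rest.length : Nat) : Int) 1).foldl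
      (fun l i =>
        if PySem.List.pyGetD l (i + 1) 0 ≤ PySem.List.pyGetD l i 0 then
          PySem.List.pySetD l (i + 1) (PySem.List.pyGetD l i 0 + 2)
        else l) (done ++ p :: rest)
      = done ++ p :: pvChain p rest := by
  induction rest with
  | nil => intro done p; simp [PySem.List.pyRange_one_eq_nil, pvChain]
  | cons x xs ih =>
    intro done p
    rw [PySem.List.pyRange_one_cons (by push_cast [List.length_cons]; omega)]
    simp only [List.foldl_cons]
    have hidx : ((done.length : Int) + 1) = (((done ++ [p]).length : Nat) : Int) := by
      push_cast [List.length_append, List.length_cons, List.length_nil]; ring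
    have hget1 : PySem.List.pyGetD (done ++ p :: x :: xs) ((done.length : Int) + 1) 0 = x := by
      rw [hidx, PySem.List.pyGetD_natCast,
          show done ++ p :: x :: xs = (done ++ [p]) ++ x :: xs from by simp, getD_mid]
    rw [show (if PySem.List.pyGetD (done ++ p :: x :: xs) ((done.length : Int) + 1) 0 ≤
            PySem.List.pyGetD (done ++ p :: x :: xs) (done.length : Int) 0 then
          PySem.List.pySetD (done ++ p :: x :: xs) ((done.length : Int) + 1)
            (PySem.List.pyGetD (done ++ p :: x :: xs) (done.length : Int) 0 + 2)
        else (done ++ p :: x :: xs))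
        = (done ++ [p]) ++ (if x ≤ p then p + 2 else x) :: xs from by
      rw [hget1]
      simp only [PySem.List.pyGetD_natCast, getD_mid]
      split_ifs with h
      · rw [hidx, PySem.List.pySetD_natCast,
            show done ++ p :: x :: xs = (done ++ [p]) ++ x :: xs from by simp, set_mid]
      · simp]
    rw [hidx,
        show ((done.length + (x :: xs).length : Nat) : Int)
            = (((done ++ [p]).length + xs.length : Nat) : Int) from by
          push_cast [List.length_append, List.length_cons, List.length_nil]; ring,
        ih (done ++ [p]) (if x ≤ p then p + 2 else x)]
    simp [pvChain]

-- A's third loop sums the componentwise differences of the unprocessed suffixes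
lemma loop3_aux (rest : List Int) : ∀ (rest1 done1 done : List Int) (t : Int),
    rest1.length = rest.length → done1.length = done.length →
    (PySem.List.pyRange (done.length : Int) ((done.length + rest.length : Nat) : Int) 1).foldl
      (fun total i =>
        total + (PySem.List.pyGetD (done1 ++ rest1) i 0 - PySem.List.pyGetD (done ++ rest) i 0)) t
      = t + (rest1.sum - rest.sum) := by
  induction rest with
  | nil =>
    intro rest1 done1 done t h1 _
    have : rest1 = [] := List.length_eq_zero_iff.mp h1
    subst this
    simp [PySem.List.pyRange_one_eq_nil]
  | cons x xs ih =>
    intro rest1 done1 done t h1 h2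
    cases rest1 with
    | nil => simp at h1
    | cons y ys =>
      rw [PySem.List.pyRange_one_cons (by push_cast [List.length_cons]; omega)]
      simp only [List.foldl_cons]
      rw [show PySem.List.pyGetD (done1 ++ y :: ys) (done.length : Int) 0 = y from by
            rw [PySem.List.pyGetD_natCast, ← h2, getD_mid],
          show PySem.List.pyGetD (done ++ x :: xs) (done.length : Int) 0 = x from by
            rw [PySem.List.pyGetD_natCast, getD_mid],
          show done1 ++ y :: ys = (done1 ++ [y]) ++ ys from by simp,
          show done ++ x :: xs = (done ++ [x]) ++ xs from by simp,
          show ((done.length : Int) + 1) = (((done ++ [x]).length : Nat) : Int) from by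
            push_cast [List.length_append, List.length_cons, List.length_nil]; ring,
          show ((done.length + (x :: xs).length : Nat) : Int)
              = (((done ++ [x]).length + xs.length : Nat) : Int) from by
            push_cast [List.length_append, List.length_cons, List.length_nil]; ring,
          ih ys (done1 ++ [y]) (done ++ [x]) _ (by simpa using h1) (by simp [h2])]
      simp [List.sum_cons]; ring

-- top-level forms of the three loop lemmas, as they appear in port A
lemma loop1_top (lst : List Int) :
    (PySem.List.pyRange 0 (lst.length : Int) 1).foldl
      (fun l i =>
        if PySem.Int.mod (PySem.List.pyGetD l i 0) 2 ≠ 0 then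
          PySem.List.pySetD l i (PySem.List.pyGetD l i 0 + 1)
        else l) lst = lst.map pvEv := by
  have h := loop1_aux lst []
  simpa using h

lemma loop2_top (p : Int) (l : List Int) :
    (PySem.List.pyRange 0 (((p :: l).length : Int) - 1) 1).foldl
      (fun l i =>
        if PySem.List.pyGetD l (i + 1) 0 ≤ PySem.List.pyGetD l i 0 then
          PySem.List.pySetD l (i + 1) (PySem.List.pyGetD l i 0 + 2)
        else l) (p :: l) = p :: pvChain p l := by
  have h := loop2_aux l [] p
  rw [show (((p :: l).length : Int) - 1) = ((l.length : Nat) : Int) from by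
    push_cast [List.length_append, List.length_cons, List.length_nil]; ring]
  simpa using h

lemma loop3_top (u v : List Int) (h : u.length = v.length) :
    (PySem.List.pyRange 0 ((v.length : Nat) : Int) 1).foldl
      (fun total i =>
        total + (PySem.List.pyGetD u i 0 - PySem.List.pyGetD v i 0)) 0 = u.sum - v.sum := by
  have h3 := loop3_aux v u [] [] 0 h rfl
  simpa using h3

-- B's running-prefix-maximum fold reproduces the pvChain difference sum:
-- invariant p = b + 2*i - 2 (= previous adjusted value), p even; every pvEv value is even,
-- so "max(p + 2, pvEv x)" coincides with A's "if pvEv x ≤ p then p + 2 else pvEv x".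
lemma balt_aux (xs : List Int) : ∀ (i b t p : Int), p = b + 2 * i - 2 → p % 2 = 0 →
    ((PySem.List.enumerate xs i).foldl (fun (st : Option Int × Int) ix =>
      let key := ix.2 + PySem.Int.mod ix.2 2 - 2 * ix.1
      let best := match st.1 with
        | none => key
        | some b => if key > b then key else b
      (some best, st.2 + (best + 2 * ix.1 - ix.2))) ((some b : Option Int), t)).2
      = t + ((pvChain p (xs.map pvEv)).sum - xs.sum) := by
  induction xs with
  | nil => intro i b t p _ _; simp [PySem.List.enumerate_nil, pvChain]
  | cons x xs ih =>
    intro i b t p hp hpe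
    rw [PySem.List.enumerate_cons, List.foldl_cons]
    have hkey : x + PySem.Int.mod x 2 - 2 * i = pvEv x - 2 * i := by
      rw [pvEv_mod]
    have hxe := pvEv_even x
    have hadj : (if pvEv x - 2 * i > b then pvEv x - 2 * i else b) + 2 * i
        = (if pvEv x ≤ p then p + 2 else pvEv x) := by
      split_ifs with h1 h2 <;> omega
    have hstep : (let key := x + PySem.Int.mod x 2 - 2 * i
        let best := match ((some b : Option Int), t).1 with
          | none => key
          | some b => if key > b then key else b
        ((some best : Option Int), ((some b : Option Int), t).2 + (best + 2 * i - x)))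
        = ((some (if pvEv x - 2 * i > b then pvEv x - 2 * i else b) : Option Int),
           t + ((if pvEv x ≤ p then p + 2 else pvEv x) - x)) := by
      simp only [hkey]
      rw [show (if pvEv x - 2 * i > b then pvEv x - 2 * i else b) + 2 * i - x
            = (if pvEv x ≤ p then p + 2 else pvEv x) - x from by rw [hadj]]
    rw [hstep,
        ih (i + 1) (if pvEv x - 2 * i > b then pvEv x - 2 * i else b) _
          (if pvEv x ≤ p then p + 2 else pvEv x)
          (by rw [← hadj]; ring) (by split_ifs <;> omega)]
    simp [pvChain, List.sum_cons]
    ring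

lemma balt_cons (x : Int) (xs : List Int) :
    homework_2_alt (x :: xs)
      = 0 + (pvEv x - x) + ((pvChain (pvEv x) (xs.map pvEv)).sum - xs.sum) := by
  unfold homework_2_alt
  rw [PySem.List.enumerate_cons, List.foldl_cons]
  have hstep : (let key := x + PySem.Int.mod x 2 - 2 * (0 : Int)
      let best := match ((none : Option Int), (0 : Int)).1 with
        | none => key
        | some b => if key > b then key else b
      ((some best : Option Int), ((none : Option Int), (0 : Int)).2 + (best + 2 * (0 : Int) - x)))
      = ((some (pvEv x) : Option Int), 0 + (pvEv x - x)) := by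
    simp only []
    rw [show x + PySem.Int.mod x 2 - 2 * (0 : Int) = pvEv x from by rw [← pvEv_mod]; ring]
    norm_num
  rw [hstep, balt_aux xs (0 + 1) (pvEv x) _ (pvEv x) (by ring) (pvEv_even x)]

-- ===== VERDICT (by name: the statement is the Claim_ definition above) =====
theorem homework_2_spec : Claim_equal_homework_2 := by
  intro lst _
  unfold Spec_homework_2
  cases lst with
  | nil => decide
  | cons x xs =>
    simp only [homework_2]
    rw [loop1_top, List.map_cons, loop2_top, balt_cons,
        loop3_top _ _ (by simp [pvChain_length])]
    simp [List.sum_cons]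
    ring
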